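-- pv_equiv track=rewrite | github.com/kirsty-tortoise/comp4-simulation | COMP4_Simulation/ExpressionsEvaluation.py | splitOutsideBrackets
-- ===== SOURCE A (Python) =====
-- def splitOutsideBrackets(exp, openBrackets, closeBrackets, splittingOperators):
--     '''
--     This function takes a mathematical expression as a string and a list of opening brackets, closing brackets and operators to be split by.
--     It splits the expression into a list of strings split by any of these operators out of all brackets.
--     It returns two lists: the split expressions and the operators joining them.
--     '''
--
--     # operands is a list of the split expressions.
--     operands = []
--
--     # operators is a list of the operators the expression is split by.
--     operators = []
--
--     # lastExpression collects the expression since a relevant operator was last found.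
--     lastExpression = ""
--
--     # bracketCount counts the net (open brackets are positive and close brackets are negative) number of brackets encountered so far.
--     bracketCount = 0
--
--     for symbol in exp:
--         if symbol in openBrackets:
--             bracketCount += 1
--
--         elif symbol in closeBrackets:
--             bracketCount -= 1
--
--         # A new if is used (rather than elif) as the else should happen in the first two cases.
--         if bracketCount == 0 and symbol in splittingOperators:
--             # A plus/minus has been found, so split the expression.
--             operands.append(lastExpression)
--             operators.append(symbol)
--             lastExpression = ""
--
--         else:
--             # Add the symbol to the end of lastExpression and keep going.
--             lastExpression += symbol
--
--     # Add the final operand to the list.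
--     operands.append(lastExpression)
--
--     return operands, operators
-- ===== SOURCE B (Python) =====
-- def splitOutsideBrackets(exp, openBrackets, closeBrackets, splittingOperators):
--     # Two-phase: first find the depth-zero split positions, then rebuild the
--     # operands by slicing instead of char-by-char accumulation.
--     splits = []
--     bracketCount = 0
--     for i, symbol in enumerate(exp):
--         if symbol in openBrackets:
--             bracketCount += 1
--         elif symbol in closeBrackets:
--             bracketCount -= 1
--         if bracketCount == 0 and symbol in splittingOperators:
--             splits.append((i, symbol))
--     operators = [symbol for _, symbol in splits]
--     operands = []
--     start = 0
--     for i, _ in splits: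
--         operands.append(exp[start:i])
--         start = i + 1
--     operands.append(exp[start:])
--     return operands, operators
-- ===== Notes on version B (the rewrite author's own statement) =====
-- stated objective: alternative
-- what changed: Replaces A's single pass with a char-by-char string accumulator by a two-phase decomposition: first collect the (index, operator) pairs at bracket-depth zero, then rebuild the operands by slicing the expression between consecutive split positions.
import Mathlib
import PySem

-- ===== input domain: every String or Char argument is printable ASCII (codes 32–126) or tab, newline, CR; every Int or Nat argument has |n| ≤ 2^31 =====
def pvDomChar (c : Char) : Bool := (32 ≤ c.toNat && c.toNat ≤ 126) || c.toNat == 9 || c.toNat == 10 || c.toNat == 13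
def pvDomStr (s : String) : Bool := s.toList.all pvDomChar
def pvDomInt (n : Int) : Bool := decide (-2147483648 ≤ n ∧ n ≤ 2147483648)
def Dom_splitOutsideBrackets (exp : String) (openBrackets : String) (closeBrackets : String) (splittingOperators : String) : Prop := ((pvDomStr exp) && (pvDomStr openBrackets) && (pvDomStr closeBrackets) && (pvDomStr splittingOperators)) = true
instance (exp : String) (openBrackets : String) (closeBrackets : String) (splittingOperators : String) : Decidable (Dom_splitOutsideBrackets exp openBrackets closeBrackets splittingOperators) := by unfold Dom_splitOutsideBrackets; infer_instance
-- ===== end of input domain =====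

-- B replaces A's char-by-char accumulator with a two-phase decomposition (collect split
-- positions, then rebuild operands by slicing); objective: alternative decomposition, not speed.

-- ===== PORT A =====
-- A's for-loop over exp with state (operands, operators, lastExpression, bracketCount),
-- as structural recursion over the characters.  'symbol in s' is the Python substring
-- test with a one-char needle, ported exactly as PySem.Chars.isIn [symbol] s.toList.
def pvLoopA (ob cb so : List Char) : List Char → List String → List String → List Char → Int →
    List String × List String
  | [], operands, operators, last, _ => (operands ++ [String.ofList last], operators)
  | c :: rest, operands, operators, last, bc =>
    let bc1 : Int :=
      if PySem.Chars.isIn [c] ob then bc + 1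
      else if PySem.Chars.isIn [c] cb then bc - 1
      else bc
    if bc1 = 0 ∧ PySem.Chars.isIn [c] so then
      pvLoopA ob cb so rest (operands ++ [String.ofList last]) (operators ++ [String.ofList [c]]) [] bc1
    else
      pvLoopA ob cb so rest operands operators (last ++ [c]) bc1

def splitOutsideBrackets (exp : String) (openBrackets : String) (closeBrackets : String) (splittingOperators : String) : List String × List String :=
  pvLoopA openBrackets.toList closeBrackets.toList splittingOperators.toList exp.toList [] [] [] 0

-- ===== PORT B =====
-- Phase 1 of B: the enumerate loop collecting (index, symbol) at the depth-zero operators.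
def pvCollectB (ob cb so : List Char) : List Char → Nat → Int → List (Nat × Char)
  | [], _, _ => []
  | c :: rest, i, bc =>
    let bc1 : Int :=
      if PySem.Chars.isIn [c] ob then bc + 1
      else if PySem.Chars.isIn [c] cb then bc - 1
      else bc
    (if bc1 = 0 ∧ PySem.Chars.isIn [c] so then [(i, c)] else []) ++
      pvCollectB ob cb so rest (i + 1) bc1

-- Phase 2 of B: the slicing loop building operands (exp[start:i] per split, then exp[start:]).
def pvOperandsB (exp : List Char) : List (Nat × Char) → Nat → List String → List String
  | [], start, acc => acc ++ [String.ofList (PySem.List.slice exp (some (start : Int)) none)]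
  | (i, _) :: rest, start, acc =>
      pvOperandsB exp rest (i + 1)
        (acc ++ [String.ofList (PySem.List.slice exp (some (start : Int)) (some (i : Int)))])

def splitOutsideBrackets_alt (exp : String) (openBrackets : String) (closeBrackets : String) (splittingOperators : String) : List String × List String :=
  let splits := pvCollectB openBrackets.toList closeBrackets.toList splittingOperators.toList exp.toList 0 0
  let operators := splits.map (fun p => String.ofList [p.2])
  let operands := pvOperandsB exp.toList splits 0 []
  (operands, operators)

-- ===== PRECONDITION & SPEC =====
def Spec_splitOutsideBrackets (exp : String) (openBrackets : String) (closeBrackets : String) (splittingOperators : String) (out : List String × List String) : Prop := out = splitOutsideBrackets_alt exp openBrackets closeBrackets splittingOperators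
instance (exp : String) (openBrackets : String) (closeBrackets : String) (splittingOperators : String) (out : List String × List String) : Decidable (Spec_splitOutsideBrackets exp openBrackets closeBrackets splittingOperators out) := by unfold Spec_splitOutsideBrackets; infer_instance

-- ===== CLAIM (what is proved, stated in full; the proofs are below) =====
def Claim_equal_splitOutsideBrackets : Prop := ∀ (exp : String) (openBrackets : String) (closeBrackets : String) (splittingOperators : String), Dom_splitOutsideBrackets exp openBrackets closeBrackets splittingOperators → Spec_splitOutsideBrackets exp openBrackets closeBrackets splittingOperators (splitOutsideBrackets exp openBrackets closeBrackets splittingOperators)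

-- ===== LEMMAS AND PROOFS =====

-- Invariant lemma: running A's loop on the suffix full.drop i, with lastExpression equal
-- to the slice full[start:i], produces B's two phases run from (i, start).
theorem pvLoop_eq_phases (ob cb so full : List Char) :
    ∀ (chars : List Char) (i start : Nat) (bc : Int) (operands operators : List String),
      full.drop i = chars → start ≤ i →
      pvLoopA ob cb so chars operands operators ((full.drop start).take (i - start)) bc
        = (pvOperandsB full (pvCollectB ob cb so chars i bc) start operands,
           operators ++ (pvCollectB ob cb so chars i bc).map (fun p => String.ofList [p.2])) := by
  intro chars
  induction chars with
  | nil =>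
    intro i start bc operands operators hdrop hle
    have hlen : full.length ≤ i := by
      have := congrArg List.length hdrop
      simp only [List.length_drop, List.length_nil] at this
      omega
    have htake : (full.drop start).take (i - start) = full.drop start := by
      apply List.take_of_length_le
      simp only [List.length_drop]
      omega
    simp [pvLoopA, pvCollectB, pvOperandsB, PySem.List.slice_from_natCast, htake]
  | cons c rest ih =>
    intro i start bc operands operators hdrop hle
    have hi : i < full.length := by
      have := congrArg List.length hdrop
      simp only [List.length_drop, List.length_cons] at this
      omega
    have hgetc : full[i]? = some c := by
      have h0 : (full.drop i)[0]? = some c := by rw [hdrop]; rfl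
      simpa [List.getElem?_drop] using h0
    have hrest : full.drop (i + 1) = rest := by
      have h1 : (full.drop i).drop 1 = rest := by rw [hdrop]; rfl
      simpa [List.drop_drop] using h1
    simp only [pvLoopA, pvCollectB]
    by_cases hcond :
        (if PySem.Chars.isIn [c] ob then bc + 1
         else if PySem.Chars.isIn [c] cb then bc - 1 else bc) = 0 ∧
        PySem.Chars.isIn [c] so = true
    · have hslice : PySem.List.slice full (some (start : Int)) (some (i : Int))
          = (full.drop start).take (i - start) := by
        simpa using PySem.List.slice_natCast full start i
      have h := ih (i + 1) (i + 1) (if PySem.Chars.isIn [c] ob then bc + 1 else if PySem.Chars.isIn [c] cb then bc - 1 else bc) (operands ++ [String.ofList ((full.drop start).take (i - start))])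
        (operators ++ [String.ofList [c]]) hrest (le_refl _)
      simp only [Nat.sub_self, List.take_zero] at h
      rw [if_pos hcond, if_pos hcond, h]
      simp [pvOperandsB, hslice]
    · simp only [hcond, if_false]
      have h := ih (i + 1) start (if PySem.Chars.isIn [c] ob then bc + 1 else if PySem.Chars.isIn [c] cb then bc - 1 else bc) operands operators hrest (by omega)
      have htake : (full.drop start).take (i + 1 - start)
          = (full.drop start).take (i - start) ++ [c] := by
        have hsucc : i + 1 - start = (i - start) + 1 := by omega
        have hg : (full.drop start)[i - start]? = some c := by
          rw [List.getElem?_drop]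
          have : start + (i - start) = i := by omega
          rw [this, hgetc]
        rw [hsucc, List.take_add_one, hg]
        rfl
      rw [htake] at h
      exact h

theorem splitOutsideBrackets_spec : Claim_equal_splitOutsideBrackets := by
  intro exp ob cb so _
  have h := pvLoop_eq_phases ob.toList cb.toList so.toList exp.toList exp.toList 0 0 0 [] []
    (by simp) (le_refl 0)
  simpa [splitOutsideBrackets, splitOutsideBrackets_alt, Spec_splitOutsideBrackets] using h
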